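-- pv_equiv track=rewrite | github.com/filemon11/deptag | deptag/learning/dataset.py | ptb_unescape
-- ===== SOURCE A (Python) =====
-- from typing import Mapping, Sequence, Iterable
--
-- BERT_TOKEN_MAPPING = {
--     "-LRB-": "(",
--     "-RRB-": ")",
--     "-LCB-": "{",
--     "-RCB-": "}",
--     "-LSB-": "[",
--     "-RSB-": "]",
--     "``": '"',
--     "''": '"',
--     "`": "'",
--     '«': '"',
--     '»': '"',
--     '‘': "'",
--     '’': "'",
--     '“': '"',
--     '”': '"',
--     '„': '"',
--     '‹': "'",
--     '›': "'",
--     "\u2013": "--",  # en dash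
--     "\u2014": "--",  # em dash
-- }
--
-- def ptb_unescape(sent: Iterable[str]) -> list[str]:
--     cleaned_words: list[str] = []
--     for word in sent:
--         word = BERT_TOKEN_MAPPING.get(word, word)
--         word = word.replace('\\/', '/').replace('\\*', '*')
--         # Mid-token punctuation occurs in biomedical text
--         word = word.replace('-LSB-', '[').replace('-RSB-', ']')
--         word = word.replace('-LRB-', '(').replace('-RRB-', ')')
--         if word == "n't" and cleaned_words:
--             cleaned_words[-1] = cleaned_words[-1] + "n"
--             word = "'t"
--         cleaned_words.append(word)
--     return cleaned_words
-- ===== SOURCE B (Python) =====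
-- BERT_TOKEN_MAPPING = {
--     "-LRB-": "(",
--     "-RRB-": ")",
--     "-LCB-": "{",
--     "-RCB-": "}",
--     "-LSB-": "[",
--     "-RSB-": "]",
--     "``": '"',
--     "''": '"',
--     "`": "'",
--     '«': '"',
--     '»': '"',
--     '‘': "'",
--     '’': "'",
--     '“': '"',
--     '”': '"',
--     '„': '"',
--     '‹': "'",
--     '›': "'",
--     "\u2013": "--",
--     "\u2014": "--",
-- }
--
-- def _clean(word):
--     word = BERT_TOKEN_MAPPING.get(word, word)
--     word = word.replace('\\/', '/').replace('\\*', '*')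
--     word = word.replace('-LSB-', '[').replace('-RSB-', ']')
--     word = word.replace('-LRB-', '(').replace('-RRB-', ')')
--     return word
--
-- def ptb_unescape(sent):
--     # Right-to-left single pass with a carry flag: a non-initial "n't" becomes "'t"
--     # and sends an 'n'-carry to its left neighbour, which is attached when that
--     # neighbour (already split/cleaned) is emitted.  No emitted token is ever
--     # mutated afterwards.  The first token can never split, so it is handled last.
--     sent = list(sent)
--     if not sent:
--         return []
--     out = []
--     carry = False
--     for word in reversed(sent[1:]):
--         w = _clean(word)
--         split = (w == "n't")
--         if split:
--             w = "'t"
--         if carry: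
--             w += "n"
--         out.append(w)
--         carry = split
--     w = _clean(sent[0])
--     if carry:
--         w += "n"
--     out.append(w)
--     out.reverse()
--     return out
-- ===== Notes on version B (the rewrite author's own statement) =====
-- stated objective: alternative
-- what changed: A scans left-to-right and mutates the last emitted token when it meets "n't"; B scans right-to-left once with a carry flag (a non-initial "n't" emits "'t" and carries an 'n' to its left neighbour), so no emitted token is ever modified afterwards.
import Mathlib
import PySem

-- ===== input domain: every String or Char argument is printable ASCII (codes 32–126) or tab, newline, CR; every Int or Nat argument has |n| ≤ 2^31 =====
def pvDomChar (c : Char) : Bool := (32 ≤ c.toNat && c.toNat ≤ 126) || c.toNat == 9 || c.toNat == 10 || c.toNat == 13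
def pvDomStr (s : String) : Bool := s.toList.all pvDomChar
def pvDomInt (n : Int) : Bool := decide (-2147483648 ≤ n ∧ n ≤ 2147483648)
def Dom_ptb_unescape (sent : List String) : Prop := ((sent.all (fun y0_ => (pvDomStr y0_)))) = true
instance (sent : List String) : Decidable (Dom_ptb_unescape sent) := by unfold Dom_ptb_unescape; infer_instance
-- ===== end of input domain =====

-- B replaces A's left-to-right loop (which mutates the last emitted token on "n't") with a
-- right-to-left single pass carrying an 'n' flag to the left neighbour — objective: alternative.

-- shared module-level constant of both Pythons
def BERT_TOKEN_MAPPING : PySem.Dict String String := PySem.Dict.ofList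
  [("-LRB-", "("), ("-RRB-", ")"), ("-LCB-", "{"), ("-RCB-", "}"),
   ("-LSB-", "["), ("-RSB-", "]"), ("``", "\""), ("''", "\""), ("`", "'"),
   ("«", "\""), ("»", "\""), ("‘", "'"), ("’", "'"), ("“", "\""), ("”", "\""),
   ("„", "\""), ("‹", "'"), ("›", "'"), ("\u2013", "--"), ("\u2014", "--")]

-- ===== PORT A =====
def ptb_unescape (sent : List String) : List String :=
  sent.foldl (fun cleaned_words word =>
    let word := BERT_TOKEN_MAPPING.getD word word
    let word := PySem.Str.replace (PySem.Str.replace word "\\/" "/") "\\*" "*"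
    let word := PySem.Str.replace (PySem.Str.replace word "-LSB-" "[") "-RSB-" "]"
    let word := PySem.Str.replace (PySem.Str.replace word "-LRB-" "(") "-RRB-" ")"
    if word == "n't" && !cleaned_words.isEmpty then
      (cleaned_words.dropLast ++ [cleaned_words.getLast! ++ "n"]) ++ ["'t"]
    else
      cleaned_words ++ [word]) []

-- ===== PORT B =====
-- helper _clean: normalize one token independently
def ptbClean (word : String) : String :=
  let word := BERT_TOKEN_MAPPING.getD word word
  let word := PySem.Str.replace (PySem.Str.replace word "\\/" "/") "\\*" "*"
  let word := PySem.Str.replace (PySem.Str.replace word "-LSB-" "[") "-RSB-" "]"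
  PySem.Str.replace (PySem.Str.replace word "-LRB-" "(") "-RRB-" ")"

-- B's loop body: one step of the right-to-left pass (state = emitted-so-far reversed, carry)
def ptbStepB (s : List String × Bool) (word : String) : List String × Bool :=
  let w := ptbClean word
  let split := w == "n't"
  let w := if split then "'t" else w
  let w := if carry (s := s) then w ++ "n" else w
  (s.1 ++ [w], split)
where carry (s : List String × Bool) : Bool := s.2

def ptb_unescape_alt (sent : List String) : List String :=
  match sent with
  | [] => []
  | w0 :: rest =>
    let s := (rest.reverse).foldl ptbStepB ([], false)
    let w := ptbClean w0
    let w := if s.2 then w ++ "n" else w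
    (s.1 ++ [w]).reverse

-- ===== PRECONDITION & SPEC =====
def Spec_ptb_unescape (sent : List String) (out : List String) : Prop := out = ptb_unescape_alt sent
instance (sent : List String) (out : List String) : Decidable (Spec_ptb_unescape sent out) := by unfold Spec_ptb_unescape; infer_instance

-- ===== CLAIM (what is proved, stated in full; the proofs are below) =====
def Claim_equal_ptb_unescape : Prop := ∀ (sent : List String), Dom_ptb_unescape sent → Spec_ptb_unescape sent (ptb_unescape sent)

-- ===== LEMMAS AND PROOFS =====

-- reference right-recursion: go isFirst l = (result for l, whether l's head split)
def ptbGo : Bool → List String → List String × Bool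
  | _, [] => ([], false)
  | isFirst, w :: rest =>
    let p := ptbGo false rest
    let c := ptbClean w
    let split := c == "n't" && !isFirst
    let w' := if split then "'t" else c
    let w'' := if p.2 then w' ++ "n" else w'
    (w'' :: p.1, split)

def ptbBump (acc : List String) : List String :=
  acc.dropLast ++ [acc.getLast! ++ "n"]

-- A's loop body, named (definitionally equal to the lambda in ptb_unescape)
def ptbStepA (acc : List String) (w : String) : List String :=
  if ptbClean w == "n't" && !acc.isEmpty then ptbBump acc ++ ["'t"] else acc ++ [ptbClean w]

theorem ptb_unescape_eq_foldlA (sent : List String) :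
    ptb_unescape sent = sent.foldl ptbStepA [] := rfl

theorem ptbBump_concat (X : List String) (y : String) :
    ptbBump (X ++ [y]) = X ++ [y ++ "n"] := by
  simp [ptbBump]

-- A's fold, started from any accumulator, equals applying ptbGo and grafting the carry onto acc
theorem foldlA_eq_go (l : List String) : ∀ (acc : List String),
    l.foldl ptbStepA acc
    = (if (ptbGo acc.isEmpty l).2 then ptbBump acc else acc) ++ (ptbGo acc.isEmpty l).1 := by
  induction l with
  | nil => intro acc; simp [ptbGo]
  | cons w rest ih =>
    intro acc
    simp only [List.foldl_cons]
    by_cases hsplit : (ptbClean w == "n't" && !acc.isEmpty) = true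
    · rw [show ptbStepA acc w = ptbBump acc ++ ["'t"] by rw [ptbStepA, if_pos hsplit]]
      rw [ih (ptbBump acc ++ ["'t"])]
      simp only [ptbGo, hsplit]
      have hne : (ptbBump acc ++ ["'t"]).isEmpty = false := by simp
      rw [hne]
      by_cases hc : (ptbGo false rest).2 = true
      · simp [hc, ptbBump_concat]
      · simp only [Bool.not_eq_true] at hc
        simp [hc]
    · rw [show ptbStepA acc w = acc ++ [ptbClean w] by rw [ptbStepA, if_neg hsplit]]
      rw [ih (acc ++ [ptbClean w])]
      simp only [ptbGo, hsplit]
      have hne : (acc ++ [ptbClean w]).isEmpty = false := by simp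
      rw [hne]
      by_cases hc : (ptbGo false rest).2 = true
      · simp [hc, ptbBump_concat]
      · simp only [Bool.not_eq_true] at hc
        simp [hc]

theorem go_true_snd (l : List String) : (ptbGo true l).2 = false := by
  cases l <;> simp [ptbGo]

theorem ptb_unescape_eq_go (sent : List String) :
    ptb_unescape sent = (ptbGo true sent).1 := by
  rw [ptb_unescape_eq_foldlA, foldlA_eq_go]
  simp [go_true_snd]

-- B's reversed fold computes ptbGo false with the output list reversed
theorem foldlB_eq_go (l : List String) :
    (l.reverse).foldl ptbStepB ([], false) = ((ptbGo false l).1.reverse, (ptbGo false l).2) := by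
  induction l with
  | nil => simp [ptbGo]
  | cons w rest ih =>
    simp only [List.reverse_cons, List.foldl_append, List.foldl_cons, List.foldl_nil, ih]
    simp [ptbStepB, ptbStepB.carry, ptbGo]

theorem ptb_unescape_alt_eq_go (sent : List String) :
    ptb_unescape_alt sent = (ptbGo true sent).1 := by
  cases sent with
  | nil => simp [ptb_unescape_alt, ptbGo]
  | cons w0 rest =>
    show ((rest.reverse.foldl ptbStepB ([], false)).1 ++
      [if (rest.reverse.foldl ptbStepB ([], false)).2 then ptbClean w0 ++ "n" else ptbClean w0]).reverse
      = (ptbGo true (w0 :: rest)).1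
    rw [foldlB_eq_go]
    simp [ptbGo]

-- ===== VERDICT (by name: the statement is the Claim_ definition above) =====
theorem ptb_unescape_spec : Claim_equal_ptb_unescape := by
  intro sent _
  unfold Spec_ptb_unescape
  rw [ptb_unescape_eq_go, ptb_unescape_alt_eq_go]
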